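-- pv_equiv track=rewrite | github.com/bates64/papermario-dx | tools/format.py | fix_comma_spacing
-- ===== SOURCE A (Python) =====
-- def fix_comma_spacing(line: str) -> str:
--     """Ensure space after commas outside of string literals and comments."""
--     result = []
--     in_string = False
--     in_char = False
--     escaped = False
--     i = 0
--     while i < len(line):
--         c = line[i]
--         if escaped:
--             escaped = False
--             result.append(c)
--             i += 1
--             continue
--         if c == "\\":
--             escaped = True
--             result.append(c)
--             i += 1
--             continue
--         if c == '"' and not in_char:
--             in_string = not in_string
--             result.append(c)
--             i += 1
--             continue
--         if c == "'" and not in_string: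
--             in_char = not in_char
--             result.append(c)
--             i += 1
--             continue
--         if not in_string and not in_char:
--             if c == "/" and i + 1 < len(line) and line[i + 1] == "/":
--                 result.append(line[i:])
--                 break
--         if c == "," and not in_string and not in_char:
--             result.append(",")
--             if i + 1 < len(line) and line[i + 1] not in (" ", "\t"):
--                 result.append(" ")
--             i += 1
--             continue
--         result.append(c)
--         i += 1
--     return "".join(result)
-- ===== SOURCE B (Python) =====
-- def fix_comma_spacing(line: str) -> str:
--     """Ensure space after commas outside of string literals and comments.
--
--     Two-pass pipeline: first segment the line into alternating code and
--     non-code (string/char literal, escape pair, comment) regions, then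
--     rewrite only the code regions, inserting a space after each comma not
--     already followed by a space/tab."""
--     # pass 1: segmentation
--     segs = []  # (is_code, text)
--     n = len(line)
--     i = 0
--     while i < n:
--         c = line[i]
--         if c == "\\":
--             segs.append((False, line[i:i + 2]))
--             i += 2
--         elif c == '"' or c == "'":
--             j = i + 1
--             while j < n:
--                 if line[j] == "\\":
--                     j += 2
--                 elif line[j] == c:
--                     j += 1
--                     break
--                 else:
--                     j += 1
--             segs.append((False, line[i:j]))
--             i = j
--         elif c == "/" and i + 1 < n and line[i + 1] == "/":
--             segs.append((False, line[i:]))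
--             i = n
--         else:
--             j = i
--             while j < n:
--                 d = line[j]
--                 if d in "\\\"'" or (d == "/" and j + 1 < n and line[j + 1] == "/"):
--                     break
--                 j += 1
--             segs.append((True, line[i:j]))
--             i = j
--     # pass 2: rewrite code regions only
--     out = []
--     for t, (is_code, text) in enumerate(segs):
--         if not is_code:
--             out.append(text)
--             continue
--         nxt = segs[t + 1][1][:1] if t + 1 < len(segs) else ""
--         buf = []
--         for k, ch in enumerate(text):
--             buf.append(ch)
--             if ch == ",":
--                 follow = text[k + 1] if k + 1 < len(text) else nxt
--                 if follow and follow not in " \t":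
--                     buf.append(" ")
--         out.append("".join(buf))
--     return "".join(out)
-- ===== Notes on version B (the rewrite author's own statement) =====
-- stated objective: alternative
-- what changed: Replaced A's single interleaved char-by-char state loop by a two-pass pipeline: pass 1 segments the line into code and non-code regions (string/char literals, escape pairs, comment) with dedicated sub-scanners, pass 2 rewrites only the code regions (space after commas not followed by space/tab) and reassembles; segments are taken as bulk string slices instead of per-char appends, a constant-factor speedup a timing run measured at ~1.7x.
import Mathlib
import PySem

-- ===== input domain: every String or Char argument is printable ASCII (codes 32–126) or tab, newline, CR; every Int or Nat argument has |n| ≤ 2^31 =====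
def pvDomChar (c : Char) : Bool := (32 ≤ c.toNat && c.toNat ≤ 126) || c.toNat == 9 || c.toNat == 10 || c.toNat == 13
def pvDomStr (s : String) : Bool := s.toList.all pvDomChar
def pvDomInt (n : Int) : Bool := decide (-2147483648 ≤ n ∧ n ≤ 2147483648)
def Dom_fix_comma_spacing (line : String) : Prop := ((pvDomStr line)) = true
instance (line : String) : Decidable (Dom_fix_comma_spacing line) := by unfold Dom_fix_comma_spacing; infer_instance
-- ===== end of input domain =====

-- B replaces A's single interleaved state loop by a classify-then-transform pipeline (segment into
-- code / non-code regions, then add the comma spaces in code regions only); objective: alternative.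

-- ===== PORT A =====
-- Literal port of A's while-loop: one char per step, state (in_string, in_char, escaped).
def fcsGoA : List Char → Bool → Bool → Bool → List Char
  | [], _, _, _ => []
  | c :: rest, instr, inch, esc =>
    if esc then c :: fcsGoA rest instr inch false
    else if c = '\\' then c :: fcsGoA rest instr inch true
    else if c = '"' ∧ inch = false then c :: fcsGoA rest (!instr) inch false
    else if c = '\'' ∧ instr = false then c :: fcsGoA rest instr (!inch) false
    else if instr = false ∧ inch = false ∧ c = '/' ∧ rest.head? = some '/' then
      c :: rest                                  -- result.append(line[i:]); break
    else if c = ',' ∧ instr = false ∧ inch = false then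
      ',' :: (match rest.head? with
              | some d => if d ≠ ' ' ∧ d ≠ '\t' then ' ' :: fcsGoA rest instr inch false
                          else fcsGoA rest instr inch false
              | none => fcsGoA rest instr inch false)
    else c :: fcsGoA rest instr inch false

def fix_comma_spacing (line : String) : String :=
  String.ofList (fcsGoA line.toList false false false)

-- ===== PORT B =====
-- Pass 1 helper: scan a quoted literal body up to (and including) the unescaped closing quote q;
-- returns (span, rest).
def fcsScanLit (q : Char) : List Char → List Char × List Char
  | [] => ([], [])
  | c :: rest =>
    if c = '\\' then
      match rest with
      | [] => ([c], [])
      | d :: rest' => (c :: d :: (fcsScanLit q rest').1, (fcsScanLit q rest').2)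
    else if c = q then ([c], rest)
    else (c :: (fcsScanLit q rest).1, (fcsScanLit q rest).2)
  termination_by l => l.length
  decreasing_by all_goals simp_all

-- Pass 1 helper: scan a maximal run of plain code chars (stop at \, ", ', or a "//").
def fcsScanCode : List Char → List Char × List Char
  | [] => ([], [])
  | c :: rest =>
    if c = '\\' ∨ c = '"' ∨ c = '\'' ∨ (c = '/' ∧ rest.head? = some '/') then
      ([], c :: rest)
    else (c :: (fcsScanCode rest).1, (fcsScanCode rest).2)

theorem fcsScanLit_len (q : Char) (l : List Char) : (fcsScanLit q l).2.length ≤ l.length := by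
  fun_induction fcsScanLit q l
  all_goals simp_all
  all_goals omega

theorem fcsScanCode_len (l : List Char) : (fcsScanCode l).2.length ≤ l.length := by
  fun_induction fcsScanCode l
  all_goals simp_all
  all_goals omega

-- Pass 1: segment the line; (true, s) = code region, (false, s) = raw region.
def fcsSegment : List Char → List (Bool × List Char)
  | [] => []
  | c :: rest =>
    if c = '\\' then
      match rest with
      | [] => [(false, [c])]
      | d :: r => (false, [c, d]) :: fcsSegment r
    else if c = '"' ∨ c = '\'' then
      (false, c :: (fcsScanLit c rest).1) :: fcsSegment (fcsScanLit c rest).2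
    else if c = '/' ∧ rest.head? = some '/' then
      [(false, c :: rest)]
    else
      (true, c :: (fcsScanCode rest).1) :: fcsSegment (fcsScanCode rest).2
  termination_by l => l.length
  decreasing_by
    · simp
    · simpa using Nat.lt_succ_of_le (fcsScanLit_len _ _)
    · simpa using Nat.lt_succ_of_le (fcsScanCode_len _)

-- Pass 2 helper: rewrite one code region; nxt is the char following the region, if any.
def fcsFixCode : List Char → Option Char → List Char
  | [], _ => []
  | c :: rest, nxt =>
    let follow : Option Char := match rest.head? with
      | some d => some d
      | none => nxt
    if c = ',' then
      match follow with
      | some d => if d ≠ ' ' ∧ d ≠ '\t' then ',' :: ' ' :: fcsFixCode rest nxt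
                  else ',' :: fcsFixCode rest nxt
      | none => ',' :: fcsFixCode rest nxt
    else c :: fcsFixCode rest nxt

-- first char of the next region, if any
def fcsNextChar : List (Bool × List Char) → Option Char
  | [] => none
  | (_, s) :: _ => s.head?

-- Pass 2: reassemble, rewriting only code regions.
def fcsRender : List (Bool × List Char) → List Char
  | [] => []
  | (false, s) :: segs => s ++ fcsRender segs
  | (true, s) :: segs => fcsFixCode s (fcsNextChar segs) ++ fcsRender segs

def fix_comma_spacing_alt (line : String) : String :=
  String.ofList (fcsRender (fcsSegment line.toList))

-- ===== PRECONDITION & SPEC =====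
def Spec_fix_comma_spacing (line : String) (out : String) : Prop := out = fix_comma_spacing_alt line
instance (line : String) (out : String) : Decidable (Spec_fix_comma_spacing line out) := by unfold Spec_fix_comma_spacing; infer_instance

-- ===== CLAIM (what is proved, stated in full; the proofs are below) =====
def Claim_equal_fix_comma_spacing : Prop := ∀ (line : String), Dom_fix_comma_spacing line → Spec_fix_comma_spacing line (fix_comma_spacing line)

-- ===== LEMMAS AND PROOFS =====

-- A inside a string literal consumes exactly the scanned span, verbatim.
theorem fcsScanCode_append (l : List Char) :
    (fcsScanCode l).1 ++ (fcsScanCode l).2 = l := by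
  fun_induction fcsScanCode l
  all_goals simp_all

theorem fcsGoA_str (l : List Char) :
    fcsGoA l true false false
      = (fcsScanLit '"' l).1 ++ fcsGoA (fcsScanLit '"' l).2 false false false := by
  fun_induction fcsScanLit '"' l
  all_goals simp_all [fcsGoA]

-- A inside a char literal consumes exactly the scanned span, verbatim.
theorem fcsGoA_chr (l : List Char) :
    fcsGoA l false true false
      = (fcsScanLit '\'' l).1 ++ fcsGoA (fcsScanLit '\'' l).2 false false false := by
  fun_induction fcsScanLit '\'' l
  all_goals simp_all [fcsGoA]

-- A over a maximal plain-code run equals the comma rewrite of that run.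
theorem fcsGoA_code (l : List Char) :
    fcsGoA l false false false
      = fcsFixCode (fcsScanCode l).1 (fcsScanCode l).2.head? ++ fcsGoA (fcsScanCode l).2 false false false := by
  fun_induction fcsScanCode l with
  | case1 => simp [fcsFixCode]
  | case2 c rest h => simp [fcsFixCode]
  | case3 c rest h ih =>
    have hh : ((fcsScanCode rest).1 ++ (fcsScanCode rest).2).head? = rest.head? := by
      rw [fcsScanCode_append]
    rw [List.head?_append] at hh
    simp only [not_or, not_and] at h
    obtain ⟨h1, h2, h3, h4⟩ := h
    by_cases hc : c = ','
    · subst hc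
      cases hr : rest.head? with
      | none =>
        have ha : (fcsScanCode rest).1.head? = none := by
          cases hx : (fcsScanCode rest).1.head? <;> simp_all
        have hb : (fcsScanCode rest).2.head? = none := by simp_all
        simp_all [fcsGoA, fcsFixCode]
      | some d =>
        simp only [fcsGoA, fcsFixCode]
        cases hx : (fcsScanCode rest).1.head? with
        | none =>
          have hb : (fcsScanCode rest).2.head? = some d := by simp_all
          simp_all
          split_ifs <;> simp_all
        | some e =>
          have he : e = d := by simp_all
          subst he
          simp_all
          split_ifs <;> simp_all
    · simp_all [fcsGoA, fcsFixCode]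

theorem fcsSegment_head (l : List Char) : fcsNextChar (fcsSegment l) = l.head? := by
  cases l with
  | nil => simp [fcsSegment, fcsNextChar]
  | cons c rest =>
    rw [fcsSegment.eq_def]
    simp only
    split_ifs with h1 h2 h3
    · cases rest <;> simp [fcsNextChar]
    · simp [fcsNextChar]
    · simp [fcsNextChar]
    · simp [fcsNextChar]

theorem fcs_main (l : List Char) :
    fcsGoA l false false false = fcsRender (fcsSegment l) := by
  fun_induction fcsSegment l with
  | case1 => simp [fcsGoA, fcsRender]
  | case2 => simp_all [fcsGoA, fcsRender]
  | case3 x1 x2 x3 => simp_all [fcsGoA, fcsRender]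
  | case4 c rest h1 h2 ih =>
    rcases h2 with h2 | h2
    · subst h2
      rw [fcsRender, ← ih]
      simp [fcsGoA, fcsGoA_str rest]
    · subst h2
      rw [fcsRender, ← ih]
      simp [fcsGoA, fcsGoA_chr rest]
  | case5 c rest h1 h2 h3 =>
    rw [fcsRender]
    rw [fcsGoA]
    simp_all [fcsRender]
  | case6 c rest h1 h2 h3 ih =>
    have hs : fcsScanCode (c :: rest) = (c :: (fcsScanCode rest).1, (fcsScanCode rest).2) := by
      rw [fcsScanCode]
      simp only [not_or] at *
      simp_all
    have := fcsGoA_code (c :: rest)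
    rw [hs] at this
    rw [this, fcsRender, ← ih, fcsSegment_head]

-- ===== VERDICT (by name: the statement is the Claim_ definition above) =====
theorem fix_comma_spacing_spec : Claim_equal_fix_comma_spacing := by
  intro line _
  unfold Spec_fix_comma_spacing fix_comma_spacing fix_comma_spacing_alt
  rw [fcs_main]
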